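-- pv_equiv track=rewrite | github.com/TTpoTaTapuH/ICL | api_server/api_server/utils/path.py | _add_slashes
-- ===== SOURCE A (Python) =====
-- def _add_slashes(s, count=1, group_len=1):
--     r = ''
--     buffer = ''
--     n = 0
--     for c in s:
--         buffer += c
--         if len(buffer) == group_len and n < count:
--             n += 1
--             r += buffer + '/'
--             buffer = ''
--     return r + buffer
-- ===== SOURCE B (Python) =====
-- def _add_slashes(s, count=1, group_len=1):
--     parts = []
--     rest = s
--     n = 0
--     while n < count and group_len > 0 and group_len <= len(rest):
--         parts.append(rest[:group_len])
--         rest = rest[group_len:]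
--         n += 1
--     parts.append(rest)
--     return '/'.join(parts)
-- ===== Notes on version B (the rewrite author's own statement) =====
-- stated objective: simpler
-- what changed: Replaces A's char-by-char loop with a growing string buffer by a loop that slices whole groups off the front and joins the parts with a slash, avoiding per-character string concatenation.
import Mathlib
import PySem

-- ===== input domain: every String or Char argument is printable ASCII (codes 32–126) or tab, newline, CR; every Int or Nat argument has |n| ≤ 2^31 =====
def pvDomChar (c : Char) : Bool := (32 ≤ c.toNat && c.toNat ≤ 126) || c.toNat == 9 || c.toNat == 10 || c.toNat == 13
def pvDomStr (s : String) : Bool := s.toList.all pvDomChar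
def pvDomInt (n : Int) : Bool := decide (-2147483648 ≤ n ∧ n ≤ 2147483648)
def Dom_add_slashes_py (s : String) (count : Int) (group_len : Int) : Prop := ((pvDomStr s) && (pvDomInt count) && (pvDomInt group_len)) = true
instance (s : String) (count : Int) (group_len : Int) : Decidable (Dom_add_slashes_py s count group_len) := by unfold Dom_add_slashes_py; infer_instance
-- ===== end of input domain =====

-- B builds the result by slicing whole groups off the front and joining the parts with a slash,
-- instead of A's char-by-char loop with a growing buffer (objective: simpler decomposition).

-- ===== PORT A =====
-- A's for-loop over the characters with state (r, buffer, n).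
def pvALoop (count group_len : Int) : List Char → List Char → List Char → Int → List Char
  | [], r, buf, _ => r ++ buf
  | c :: cs, r, buf, n =>
    let buf' := buf ++ [c]
    if (buf'.length : Int) = group_len ∧ n < count then
      pvALoop count group_len cs (r ++ buf' ++ ['/']) [] (n + 1)
    else
      pvALoop count group_len cs r buf' n

def add_slashes_py (s : String) (count : Int) (group_len : Int) : String :=
  String.mk (pvALoop count group_len s.toList [] [] 0)

-- ===== PORT B =====
-- Source B's while loop: slice off groups of length group_len while n < count; the tail is the last part.
def pvBLoop (count group_len : Int) (rest : List Char) (n : Int) : List (List Char) :=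
  if h : n < count ∧ 0 < group_len ∧ group_len ≤ (rest.length : Int) then
    rest.take group_len.toNat :: pvBLoop count group_len (rest.drop group_len.toNat) (n + 1)
  else
    [rest]
termination_by rest.length
decreasing_by
  simp only [List.length_drop]
  omega

-- join of the parts with the slash separator (Python's str.join)
def pvJoinSlash : List (List Char) → List Char
  | [] => []
  | [p] => p
  | p :: ps => p ++ '/' :: pvJoinSlash ps

def add_slashes_py_alt (s : String) (count : Int) (group_len : Int) : String :=
  String.mk (pvJoinSlash (pvBLoop count group_len s.toList 0))

-- ===== PRECONDITION & SPEC =====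
def Spec_add_slashes_py (s : String) (count : Int) (group_len : Int) (out : String) : Prop := out = add_slashes_py_alt s count group_len
instance (s : String) (count : Int) (group_len : Int) (out : String) : Decidable (Spec_add_slashes_py s count group_len out) := by unfold Spec_add_slashes_py; infer_instance

-- ===== CLAIM (what is proved, stated in full; the proofs are below) =====
def Claim_equal_add_slashes_py : Prop := ∀ (s : String) (count : Int) (group_len : Int), Dom_add_slashes_py s count group_len → Spec_add_slashes_py s count group_len (add_slashes_py s count group_len)

-- ===== LEMMAS AND PROOFS =====

-- When the count is exhausted, A just appends everything to the buffer.
theorem pvALoop_count_done (count g : Int) (cs : List Char) (r buf : List Char) (n : Int)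
    (h : ¬ n < count) : pvALoop count g cs r buf n = r ++ buf ++ cs := by
  induction cs generalizing buf with
  | nil => simp [pvALoop]
  | cons c cs ih =>
      simp only [pvALoop, h, and_false, if_false]
      rw [ih (buf ++ [c])]
      simp

-- When fewer than a full group of characters remains, the buffer never reaches group_len.
theorem pvALoop_short (count g : Int) (cs : List Char) (r buf : List Char) (n : Int)
    (h : ((buf.length : Int) + cs.length) < g) : pvALoop count g cs r buf n = r ++ buf ++ cs := by
  induction cs generalizing buf with
  | nil => simp [pvALoop]
  | cons c cs ih =>
      have hne : ¬ (((buf ++ [c]).length : Int) = g ∧ n < count) := by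
        rintro ⟨h1, -⟩
        simp at h1 h
        omega
      simp only [pvALoop, hne, if_false]
      rw [ih (buf ++ [c]) (by simp at h ⊢; omega)]
      simp

-- For non-positive group_len the buffer length (≥ 1) never equals group_len.
theorem pvALoop_nonpos (count g : Int) (cs : List Char) (r buf : List Char) (n : Int)
    (h : g ≤ 0) : pvALoop count g cs r buf n = r ++ buf ++ cs := by
  induction cs generalizing buf with
  | nil => simp [pvALoop]
  | cons c cs ih =>
      have hne : ¬ (((buf ++ [c]).length : Int) = g ∧ n < count) := by
        rintro ⟨h1, -⟩
        simp at h1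
        omega
      simp only [pvALoop, hne, if_false]
      rw [ih (buf ++ [c])]
      simp

-- Consuming one full group: the buffer fills up and is flushed exactly when it reaches g.
theorem pvALoop_fill (count g : Int) (chunk : List Char) (cs : List Char) (r buf : List Char)
    (n : Int) (hn : n < count) (hne : chunk ≠ [])
    (hlen : ((buf.length : Int) + chunk.length) = g) :
    pvALoop count g (chunk ++ cs) r buf n
      = pvALoop count g cs (r ++ buf ++ chunk ++ ['/']) [] (n + 1) := by
  induction chunk generalizing buf with
  | nil => exact absurd rfl hne
  | cons c chunk ih =>
      cases chunk with
      | nil =>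
          have hfl : (((buf ++ [c]).length : Int) = g ∧ n < count) := by
            refine ⟨?_, hn⟩
            simp at hlen ⊢
            omega
          simp only [List.cons_append, List.nil_append, pvALoop, hfl]
          simp
      | cons c2 chunk2 =>
          have hnfl : ¬ (((buf ++ [c]).length : Int) = g ∧ n < count) := by
            simp at hlen ⊢
            omega
          rw [List.cons_append, pvALoop]
          simp only [hnfl, if_false]
          rw [ih (buf ++ [c]) (by simp) (by simp at hlen ⊢; omega)]
          simp

-- pvBLoop always returns a nonempty list, so the join peels one part at a time.
theorem pvBLoop_ne (count g : Int) (rest : List Char) (n : Int) : pvBLoop count g rest n ≠ [] := by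
  rw [pvBLoop]
  split <;> simp

-- Main invariant: A's loop from an empty buffer equals r ++ join of B's remaining groups.
theorem pvLoop_eq (count g : Int) (rest : List Char) (r : List Char) (n : Int) :
    pvALoop count g rest r [] n = r ++ pvJoinSlash (pvBLoop count g rest n) := by
  induction hk : rest.length using Nat.strong_induction_on generalizing rest r n with
  | _ k ih =>
  rw [pvBLoop]
  by_cases h : n < count ∧ 0 < g ∧ g ≤ (rest.length : Int)
  · rw [dif_pos h]
    obtain ⟨hn, hg, hle⟩ := h
    have htk : (rest.take g.toNat).length = g.toNat := by
      rw [List.length_take]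
      omega
    have hfill := pvALoop_fill count g (rest.take g.toNat) (rest.drop g.toNat) r [] n hn
        (by
          intro hc
          rw [hc] at htk
          simp at htk
          omega)
        (by
          rw [htk]
          simp
          omega)
    rw [List.take_append_drop] at hfill
    rw [hfill]
    rw [ih (rest.drop g.toNat).length (by simp; omega) _ _ _ rfl]
    have hdne := pvBLoop_ne count g (rest.drop g.toNat) (n + 1)
    cases hd : pvBLoop count g (rest.drop g.toNat) (n + 1) with
    | nil => exact absurd hd hdne
    | cons p ps =>
        simp only [pvJoinSlash]
        simp [List.append_assoc]
  · rw [dif_neg h]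
    simp only [pvJoinSlash]
    push_neg at h
    by_cases hn : n < count
    · by_cases hg : 0 < g
      · have hlt : ((rest.length : Int)) < g := by
          have := h hn hg; omega
        rw [pvALoop_short count g rest r [] n (by simpa using hlt)]
        simp
      · rw [pvALoop_nonpos count g rest r [] n (by omega)]
        simp
    · rw [pvALoop_count_done count g rest r [] n hn]
      simp

-- ===== VERDICT (by name: the statement is the Claim_ definition above) =====
theorem add_slashes_py_spec : Claim_equal_add_slashes_py := by
  intro s count g _
  unfold Spec_add_slashes_py add_slashes_py add_slashes_py_alt
  rw [pvLoop_eq]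
  simp
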